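-- pv_equiv track=rewrite | github.com/dspjm/anki_batch_remove_br_and_whitespaces | batch_remove_trailing_whitespace_and_br.py | RemoveTrailingSpaceAndBr
-- ===== SOURCE A (Python) =====
-- def RemoveTrailingSpaceAndBr(fields):
--
-- 	stripped_fields = []
--
-- 	for html in fields:
-- 		while html:
-- 			if html[-4:] == "<br>":
-- 				html = html[:-4]
-- 			elif html[-6:] == "&nbsp;":
-- 				html = html[:-6]
-- 			elif html[len(html)-1] == " ":
-- 				html = html.rstrip()
-- 			else:
-- 				break
-- 		stripped_fields.append(html)
--
-- 	return stripped_fields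
-- ===== SOURCE B (Python) =====
-- def RemoveTrailingSpaceAndBr(fields):
--     stripped_fields = []
--     for html in fields:
--         end = len(html)
--         while True:
--             if end >= 4 and html[end-4:end] == "<br>":
--                 end -= 4
--             elif end >= 6 and html[end-6:end] == "&nbsp;":
--                 end -= 6
--             elif end > 0 and html[end-1] == " ":
--                 while end > 0 and html[end-1].isspace():
--                     end -= 1
--             else:
--                 break
--         stripped_fields.append(html[:end])
--     return stripped_fields
-- ===== Notes on version B (the rewrite author's own statement) =====
-- stated objective: alternative
-- what changed: Instead of repeatedly rebuilding the string by slicing off each matched trailing token, B keeps a single end index into the unchanged string and scans backwards, matching '<br>', '&nbsp;' and whitespace without copying, taking one final slice; it avoids A's O(n) copy per matched token (quadratic only when the tail is token-dense) but is not measurably faster on typical inputs.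
import Mathlib
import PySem

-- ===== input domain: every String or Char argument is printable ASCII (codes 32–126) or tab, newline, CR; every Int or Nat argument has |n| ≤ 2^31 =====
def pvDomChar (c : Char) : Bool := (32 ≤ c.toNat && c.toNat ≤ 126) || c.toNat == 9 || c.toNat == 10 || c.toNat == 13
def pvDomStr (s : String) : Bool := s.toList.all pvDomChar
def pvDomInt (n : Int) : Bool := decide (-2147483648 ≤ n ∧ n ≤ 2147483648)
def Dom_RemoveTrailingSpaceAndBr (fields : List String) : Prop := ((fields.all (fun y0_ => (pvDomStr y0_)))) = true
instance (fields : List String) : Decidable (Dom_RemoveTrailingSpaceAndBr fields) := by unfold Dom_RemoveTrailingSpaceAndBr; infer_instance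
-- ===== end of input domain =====

-- B replaces A's repeated suffix-slicing (a fresh copy per matched trailing token) with a single
-- backward scan keeping an end index into the unchanged string; objective: alternative (no copying).


-- ===== PORT A =====
-- A's per-field while loop: repeatedly slice off a trailing "<br>" / "&nbsp;", or rstrip
-- when the last character is a space; each step shortens the string.
def pvStripA (cs : List Char) : List Char :=
  if _h0 : cs = [] then cs
  else if _h1 : PySem.List.slice cs (some (-4)) none = ['<', 'b', 'r', '>'] then
    pvStripA (PySem.List.slice cs none (some (-4)))
  else if _h2 : PySem.List.slice cs (some (-6)) none = ['&', 'n', 'b', 's', 'p', ';'] then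
    pvStripA (PySem.List.slice cs none (some (-6)))
  else if _h3 : PySem.List.pyGet? cs ((cs.length : Int) - 1) = some ' ' then
    pvStripA (PySem.Chars.rstrip cs)
  else cs
termination_by cs.length
decreasing_by
  · rw [PySem.List.slice_to_neg_ofNat cs 4 (by omega)]
    have h4 : 4 ≤ cs.length := by
      by_contra h
      have := congrArg List.length _h1
      rw [PySem.List.slice_from_neg_ofNat cs 4 (by omega)] at this
      simp [List.length_drop] at this; omega
    simp [List.length_take]; omega
  · rw [PySem.List.slice_to_neg_ofNat cs 6 (by omega)]
    have h6 : 6 ≤ cs.length := by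
      by_contra h
      have := congrArg List.length _h2
      rw [PySem.List.slice_from_neg_ofNat cs 6 (by omega)] at this
      simp [List.length_drop] at this; omega
    simp [List.length_take]; omega
  · -- rstrip removes at least the trailing space
    have hlen : 1 ≤ cs.length := by cases cs <;> simp_all
    have hget : cs[cs.length - 1]? = some ' ' := by
      have he : ((cs.length : Int) - 1) = ((cs.length - 1 : Nat) : Int) := by omega
      rw [he, PySem.List.pyGet?_natCast] at _h3; exact _h3
    have hh : cs.reverse.head? = some ' ' := by
      rw [List.head?_reverse, List.getLast?_eq_getElem?]; exact hget
    cases hr : cs.reverse with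
    | nil => rw [hr] at hh; simp at hh
    | cons a t =>
      rw [hr] at hh; simp at hh; subst hh
      have hlt : cs.length = t.length + 1 := by
        have := congrArg List.length hr; simpa using this
      have hd : (PySem.Chars.rstrip cs).length ≤ t.length := by
        simp only [PySem.Chars.rstrip, hr, List.length_reverse]
        rw [List.dropWhile_cons, if_pos (by decide)]
        exact List.length_dropWhile_le _ _
      omega

def RemoveTrailingSpaceAndBr (fields : List String) : List String :=
  fields.foldl (fun acc html => acc ++ [String.ofList (pvStripA html.toList)]) []

-- ===== PORT B =====
-- B's inner whitespace scan: while end > 0 and html[end-1].isspace(): end -= 1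
def pvSkipWs (cs : List Char) (e : Nat) : Nat :=
  if 0 < e ∧ ((cs[e-1]?.map PySem.Chars.isspace).getD false) = true then pvSkipWs cs (e-1) else e
termination_by e

-- bound cited by pvEndB's decreasing_by
lemma pvSkipWs_le (cs : List Char) (e : Nat) : pvSkipWs cs e ≤ e := by
  induction e using Nat.strong_induction_on with
  | _ e ih =>
    rw [pvSkipWs]
    split
    · next h => exact le_trans (ih (e-1) (by omega)) (by omega)
    · exact le_refl e

-- strict decrease cited by pvEndB's decreasing_by
lemma pvSkipWs_lt (cs : List Char) (e : Nat) (h0 : 0 < e)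
    (hsp : ((cs[e-1]?.map PySem.Chars.isspace).getD false) = true) : pvSkipWs cs e < e := by
  rw [pvSkipWs, if_pos ⟨h0, hsp⟩]
  have := pvSkipWs_le cs (e-1); omega

-- B's backward token scan: the final end index into the unchanged string.
def pvEndB (cs : List Char) (e : Nat) : Nat :=
  if _h1 : 4 ≤ e ∧ (cs.drop (e-4)).take 4 = ['<', 'b', 'r', '>'] then pvEndB cs (e-4)
  else if _h2 : 6 ≤ e ∧ (cs.drop (e-6)).take 6 = ['&', 'n', 'b', 's', 'p', ';'] then pvEndB cs (e-6)
  else if _h3 : 0 < e ∧ cs[e-1]? = some ' ' then pvEndB cs (pvSkipWs cs e)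
  else e
termination_by e
decreasing_by
  · omega
  · omega
  · exact pvSkipWs_lt cs e _h3.1 (by rw [_h3.2]; decide)

def RemoveTrailingSpaceAndBr_alt (fields : List String) : List String :=
  fields.foldl (fun acc html =>
    acc ++ [String.ofList (html.toList.take (pvEndB html.toList html.toList.length))]) []

-- ===== PRECONDITION & SPEC =====
def Spec_RemoveTrailingSpaceAndBr (fields : List String) (out : List String) : Prop := out = RemoveTrailingSpaceAndBr_alt fields
instance (fields : List String) (out : List String) : Decidable (Spec_RemoveTrailingSpaceAndBr fields out) := by unfold Spec_RemoveTrailingSpaceAndBr; infer_instance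

-- ===== CLAIM (what is proved, stated in full; the proofs are below) =====
def Claim_equal_RemoveTrailingSpaceAndBr : Prop := ∀ (fields : List String), Dom_RemoveTrailingSpaceAndBr fields → Spec_RemoveTrailingSpaceAndBr fields (RemoveTrailingSpaceAndBr fields)

-- ===== LEMMAS AND PROOFS =====

lemma pvEndB_le (cs : List Char) (e : Nat) : pvEndB cs e ≤ e := by
  induction e using Nat.strong_induction_on with
  | _ e ih =>
    rw [pvEndB]
    split
    · next h => exact le_trans (ih (e-4) (by omega)) (by omega)
    · split
      · next h => exact le_trans (ih (e-6) (by omega)) (by omega)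
      · split
        · next h =>
          have hlt := pvSkipWs_lt cs e h.1 (by rw [h.2]; decide)
          exact le_trans (ih _ hlt) (le_of_lt hlt)
        · exact le_refl e

lemma pvSkipWs_take (cs : List Char) (m e : Nat) (h : e ≤ m) :
    pvSkipWs (cs.take m) e = pvSkipWs cs e := by
  induction e using Nat.strong_induction_on with
  | _ e ih =>
    conv_lhs => rw [pvSkipWs]
    conv_rhs => rw [pvSkipWs]
    rcases Nat.eq_zero_or_pos e with h0 | h0
    · subst h0; simp
    · rw [List.getElem?_take_of_lt (by omega : e - 1 < m)]
      by_cases hc : 0 < e ∧ (Option.map PySem.Chars.isspace cs[e-1]?).getD false = true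
      · rw [if_pos hc, if_pos hc]; exact ih (e-1) (by omega) (by omega)
      · rw [if_neg hc, if_neg hc]

lemma pvEndB_take (cs : List Char) (m e : Nat) (h : e ≤ m) :
    pvEndB (cs.take m) e = pvEndB cs e := by
  induction e using Nat.strong_induction_on with
  | _ e ih =>
    have q : ∀ k : Nat, k ≤ e → ((cs.take m).drop (e-k)).take k = (cs.drop (e-k)).take k := by
      intro k hk
      rw [List.drop_take, List.take_take]
      congr 1; omega
    conv_lhs => rw [pvEndB]
    conv_rhs => rw [pvEndB]
    by_cases h1 : 4 ≤ e ∧ (cs.drop (e-4)).take 4 = ['<', 'b', 'r', '>']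
    · rw [dif_pos h1, dif_pos ⟨h1.1, by rw [q 4 h1.1]; exact h1.2⟩]
      exact ih (e-4) (by omega) (by omega)
    · rw [dif_neg h1, dif_neg (fun hc => h1 ⟨hc.1, by rw [← q 4 hc.1]; exact hc.2⟩)]
      by_cases h2 : 6 ≤ e ∧ (cs.drop (e-6)).take 6 = ['&', 'n', 'b', 's', 'p', ';']
      · rw [dif_pos h2, dif_pos ⟨h2.1, by rw [q 6 h2.1]; exact h2.2⟩]
        exact ih (e-6) (by omega) (by omega)
      · rw [dif_neg h2, dif_neg (fun hc => h2 ⟨hc.1, by rw [← q 6 hc.1]; exact hc.2⟩)]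
        by_cases h3 : 0 < e ∧ cs[e-1]? = some ' '
        · rw [dif_pos h3, dif_pos ⟨h3.1, by
            rw [List.getElem?_take_of_lt (by omega : e - 1 < m)]; exact h3.2⟩]
          rw [pvSkipWs_take cs m e h]
          have hlt : pvSkipWs cs e < e := pvSkipWs_lt cs e h3.1 (by rw [h3.2]; decide)
          exact ih _ hlt (by omega)
        · rw [dif_neg h3, dif_neg (fun hc => h3 ⟨hc.1, by
            rw [← List.getElem?_take_of_lt (by omega : e - 1 < m)]; exact hc.2⟩)]

lemma pvSkipWs_spec (cs : List Char) (e : Nat) (h : e ≤ cs.length) :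
    pvSkipWs cs e = (List.dropWhile PySem.Chars.isspace (cs.take e).reverse).length := by
  induction e using Nat.strong_induction_on with
  | _ e ih =>
    rcases Nat.eq_zero_or_pos e with h0 | h0
    · subst h0; rw [pvSkipWs]; simp
    · obtain ⟨c, hc⟩ : ∃ c, cs[e-1]? = some c :=
        ⟨cs[e-1]'(by omega), List.getElem?_eq_getElem (by omega)⟩
      have hsplit : (cs.take e).reverse = c :: (cs.take (e-1)).reverse := by
        have : cs.take e = cs.take (e-1) ++ [c] := by
          have := List.take_add_one (l := cs) (i := e - 1)
          rw [hc] at this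
          simpa [show e - 1 + 1 = e by omega] using this
        rw [this]; simp
      rw [pvSkipWs, hsplit, List.dropWhile_cons]
      by_cases hsp : PySem.Chars.isspace c = true
      · rw [if_pos ⟨h0, by rw [hc]; simpa using hsp⟩, if_pos hsp]
        exact ih (e-1) (by omega) (by omega)
      · rw [if_neg (fun hcon => hsp (by
            rw [hc] at hcon; simpa using hcon.2)), if_neg hsp]
        simp [List.length_take]; omega

lemma pvRstrip_eq (cs : List Char) :
    PySem.Chars.rstrip cs = cs.take (pvSkipWs cs cs.length) := by
  have hpre : (List.dropWhile PySem.Chars.isspace cs.reverse).reverse <+: cs := by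
    have h := List.reverse_prefix.mpr
      (List.dropWhile_suffix (l := cs.reverse) PySem.Chars.isspace)
    simpa using h
  have heq := List.prefix_iff_eq_take.mp hpre
  rw [pvSkipWs_spec cs cs.length (le_refl _), List.take_of_length_le (le_refl cs.length),
    PySem.Chars.rstrip]
  conv_lhs => rw [heq]
  rw [List.length_reverse]

lemma pvStripA_eq (cs : List Char) : pvStripA cs = cs.take (pvEndB cs cs.length) := by
  suffices H : ∀ n (cs : List Char), cs.length = n → pvStripA cs = cs.take (pvEndB cs cs.length)
    from H cs.length cs rfl
  intro n
  induction n using Nat.strong_induction_on with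
  | _ n ih =>
    intro cs hn
    rw [pvStripA]
    by_cases h0 : cs = []
    · subst h0; rw [dif_pos rfl, pvEndB]; simp
    rw [dif_neg h0]
    have hne : 0 < cs.length := by
      cases cs with
      | nil => exact absurd rfl h0
      | cons a t => simp
    -- guard equivalences between A's negative slices and B's index tests
    have e1 : (PySem.List.slice cs (some (-4)) none = ['<', 'b', 'r', '>']) ↔
        (4 ≤ cs.length ∧ (cs.drop (cs.length-4)).take 4 = ['<', 'b', 'r', '>']) := by
      rw [PySem.List.slice_from_neg_ofNat cs 4 (by omega)]
      constructor
      · intro hq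
        have hl := congrArg List.length hq
        simp [List.length_drop] at hl
        have h4 : 4 ≤ cs.length := by omega
        exact ⟨h4, by rw [List.take_of_length_le (by simp [List.length_drop]; omega)]; exact hq⟩
      · rintro ⟨h4, hq⟩
        rw [List.take_of_length_le (by simp [List.length_drop]; omega)] at hq; exact hq
    have e2 : (PySem.List.slice cs (some (-6)) none = ['&', 'n', 'b', 's', 'p', ';']) ↔
        (6 ≤ cs.length ∧ (cs.drop (cs.length-6)).take 6 = ['&', 'n', 'b', 's', 'p', ';']) := by
      rw [PySem.List.slice_from_neg_ofNat cs 6 (by omega)]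
      constructor
      · intro hq
        have hl := congrArg List.length hq
        simp [List.length_drop] at hl
        have h6 : 6 ≤ cs.length := by omega
        exact ⟨h6, by rw [List.take_of_length_le (by simp [List.length_drop]; omega)]; exact hq⟩
      · rintro ⟨h6, hq⟩
        rw [List.take_of_length_le (by simp [List.length_drop]; omega)] at hq; exact hq
    have e3 : (PySem.List.pyGet? cs ((cs.length : Int) - 1) = some ' ') ↔
        (0 < cs.length ∧ cs[cs.length-1]? = some ' ') := by
      have hcast : ((cs.length : Int) - 1) = ((cs.length - 1 : Nat) : Int) := by omega
      rw [hcast, PySem.List.pyGet?_natCast]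
      exact ⟨fun hq => ⟨hne, hq⟩, fun hq => hq.2⟩
    -- a generic step: recurse on a strict prefix cs.take k, k < cs.length
    have step : ∀ k : Nat, k < cs.length →
        pvStripA (cs.take k) = cs.take (pvEndB cs k) := by
      intro k hk
      have hlen : (cs.take k).length = k := by simp [List.length_take]; omega
      rw [ih k (by omega) (cs.take k) hlen, hlen, pvEndB_take cs k k (le_refl k),
        List.take_take]
      congr 1
      have := pvEndB_le cs k
      omega
    by_cases h1 : 4 ≤ cs.length ∧ (cs.drop (cs.length-4)).take 4 = ['<', 'b', 'r', '>']
    · rw [dif_pos (e1.mpr h1), PySem.List.slice_to_neg_ofNat cs 4 (by omega),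
        step (cs.length - 4) (by omega)]
      conv_rhs => rw [pvEndB]
      rw [dif_pos h1]
    rw [dif_neg (fun hc => h1 (e1.mp hc))]
    by_cases h2 : 6 ≤ cs.length ∧ (cs.drop (cs.length-6)).take 6 = ['&', 'n', 'b', 's', 'p', ';']
    · rw [dif_pos (e2.mpr h2), PySem.List.slice_to_neg_ofNat cs 6 (by omega),
        step (cs.length - 6) (by omega)]
      conv_rhs => rw [pvEndB]
      rw [dif_neg h1, dif_pos h2]
    rw [dif_neg (fun hc => h2 (e2.mp hc))]
    by_cases h3 : 0 < cs.length ∧ cs[cs.length-1]? = some ' '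
    · rw [dif_pos (e3.mpr h3), pvRstrip_eq cs,
        step (pvSkipWs cs cs.length) (pvSkipWs_lt cs cs.length h3.1 (by rw [h3.2]; decide))]
      conv_rhs => rw [pvEndB]
      rw [dif_neg h1, dif_neg h2, dif_pos h3]
    rw [dif_neg (fun hc => h3 (e3.mp hc))]
    conv_rhs => rw [pvEndB]
    rw [dif_neg h1, dif_neg h2, dif_neg h3, List.take_of_length_le (le_refl _)]

-- ===== VERDICT (by name: the statement is the Claim_ definition above) =====
theorem RemoveTrailingSpaceAndBr_spec : Claim_equal_RemoveTrailingSpaceAndBr := by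
  intro fields _
  unfold Spec_RemoveTrailingSpaceAndBr RemoveTrailingSpaceAndBr RemoveTrailingSpaceAndBr_alt
  refine PySem.List.foldl_congr_mem (l := fields) _ _ [] (fun acc x _ => ?_)
  rw [pvStripA_eq]
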